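-- pv_equiv track=rewrite | github.com/Moin0304/practice | Task2/minimum_purchase_chair.py | minimum_number_chair_purchase
-- ===== SOURCE A (Python) =====
-- def minimum_number_chair_purchase(simulated_value):
--     available_chairs = 0
--     chairs_purchase = 0
--     dictionary = {'C':1,'R':-1,'U':1,'L':-1}
--     for sim in simulated_value:
--         if dictionary[sim] == 1:
--             if available_chairs > 0 :
--                 available_chairs -= 1
--             else:
--                 chairs_purchase += 1
--         else:
--             available_chairs += 1
--
--     return chairs_purchase
-- ===== SOURCE B (Python) =====
-- def minimum_number_chair_purchase(simulated_value):
--     # Right-to-left scan: g = min over prefixes (incl. empty) of the seat-balance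
--     # prefix sums; purchases needed = -g.
--     delta = {'C': -1, 'U': -1, 'R': 1, 'L': 1}
--     g = 0
--     for sim in reversed(simulated_value):
--         g = min(0, delta[sim] + g)
--     return -g
-- ===== Notes on version B (the rewrite author's own statement) =====
-- stated objective: alternative
-- what changed: Replaces the forward clamped available-chairs simulation (two accumulators) with a single right-to-left fold g = min(0, delta + g) computing the minimum prefix balance, returning -g.
import Mathlib
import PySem

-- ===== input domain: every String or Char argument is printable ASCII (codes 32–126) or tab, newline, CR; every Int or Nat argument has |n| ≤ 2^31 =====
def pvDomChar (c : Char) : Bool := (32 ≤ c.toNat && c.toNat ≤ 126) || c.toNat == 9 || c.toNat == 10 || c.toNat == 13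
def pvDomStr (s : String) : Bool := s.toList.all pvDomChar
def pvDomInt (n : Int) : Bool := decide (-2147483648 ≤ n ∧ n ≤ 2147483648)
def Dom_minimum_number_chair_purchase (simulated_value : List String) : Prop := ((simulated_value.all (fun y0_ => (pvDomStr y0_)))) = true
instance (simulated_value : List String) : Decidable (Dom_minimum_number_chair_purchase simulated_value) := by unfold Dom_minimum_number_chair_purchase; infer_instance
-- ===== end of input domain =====

-- ===== PORT A =====
-- B replaces the forward clamped available-chairs simulation with a single backward
-- fold computing the minimum prefix balance (same cost, different algorithmic decomposition).
def pvDictA : PySem.Dict String Int :=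
  ((((PySem.Dict.empty).insert "C" 1).insert "R" (-1)).insert "U" 1).insert "L" (-1)

-- loop body of A: state (available_chairs, chairs_purchase); dictionary[sim] totalised with a
-- default, Pre_ restricts to the four keys so the default is never taken (Python raises KeyError outside Pre_)
def pvStepA (st : Int × Int) (sim : String) : Int × Int :=
  if (pvDictA.get? sim).getD 0 = 1 then
    if st.1 > 0 then (st.1 - 1, st.2) else (st.1, st.2 + 1)
  else
    (st.1 + 1, st.2)

def minimum_number_chair_purchase (simulated_value : List String) : Int :=
  (simulated_value.foldl pvStepA (0, 0)).2

-- ===== PORT B =====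
def pvDictB : PySem.Dict String Int :=
  ((((PySem.Dict.empty).insert "C" (-1)).insert "U" (-1)).insert "R" 1).insert "L" 1

-- loop over reversed(simulated_value): g = min(0, delta[sim] + g); delta[sim] totalised
-- with a default, never taken under Pre_ (Python raises KeyError outside Pre_)
def minimum_number_chair_purchase_alt (simulated_value : List String) : Int :=
  -(simulated_value.reverse.foldl (fun g sim => min 0 ((pvDictB.get? sim).getD 0 + g)) 0)

-- ===== PRECONDITION & SPEC =====
-- Pre_ excludes inputs containing a string other than "C","R","U","L": there both Pythons raise KeyError.
def Pre_minimum_number_chair_purchase (simulated_value : List String) : Prop :=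
  ∀ s ∈ simulated_value, s = "C" ∨ s = "R" ∨ s = "U" ∨ s = "L"
instance (simulated_value : List String) : Decidable (Pre_minimum_number_chair_purchase simulated_value) := by unfold Pre_minimum_number_chair_purchase; infer_instance
def pvWitness_minimum_number_chair_purchase : List String := ["C", "R", "U", "L", "C"]
def Spec_minimum_number_chair_purchase (simulated_value : List String) (out : Int) : Prop := out = minimum_number_chair_purchase_alt simulated_value
instance (simulated_value : List String) (out : Int) : Decidable (Spec_minimum_number_chair_purchase simulated_value out) := by unfold Spec_minimum_number_chair_purchase; infer_instance

-- ===== CLAIM (what is proved, stated in full; the proofs are below) =====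
def Claim_equal_minimum_number_chair_purchase : Prop := ∀ (simulated_value : List String), Dom_minimum_number_chair_purchase simulated_value → Pre_minimum_number_chair_purchase simulated_value → Spec_minimum_number_chair_purchase simulated_value (minimum_number_chair_purchase simulated_value)

-- ===== LEMMAS AND PROOFS =====

theorem pvLookA_C : (pvDictA.get? "C").getD 0 = 1 := by decide
theorem pvLookA_R : (pvDictA.get? "R").getD 0 = -1 := by decide
theorem pvLookA_U : (pvDictA.get? "U").getD 0 = 1 := by decide
theorem pvLookA_L : (pvDictA.get? "L").getD 0 = -1 := by decide
theorem pvLookB_C : (pvDictB.get? "C").getD 0 = -1 := by decide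
theorem pvLookB_R : (pvDictB.get? "R").getD 0 = 1 := by decide
theorem pvLookB_U : (pvDictB.get? "U").getD 0 = -1 := by decide
theorem pvLookB_L : (pvDictB.get? "L").getD 0 = 1 := by decide

-- G sv = B's backward accumulator, in foldr form
def pvG (sv : List String) : Int :=
  sv.foldr (fun sim g => min 0 ((pvDictB.get? sim).getD 0 + g)) 0

theorem pvG_nonpos (sv : List String) : pvG sv ≤ 0 := by
  cases sv with
  | nil => simp [pvG]
  | cons s rest => simp [pvG]

theorem pvG_cons (s : String) (rest : List String) :
    pvG (s :: rest) = min 0 ((pvDictB.get? s).getD 0 + pvG rest) := rfl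

-- Invariant: starting A's loop at (a, p) with a ≥ 0, the purchases come out as
-- p + max 0 (-(a + pvG sv)).
theorem pvInv (sv : List String) (a p : Int) (ha : 0 ≤ a)
    (hpre : ∀ s ∈ sv, s = "C" ∨ s = "R" ∨ s = "U" ∨ s = "L") :
    (sv.foldl pvStepA (a, p)).2 = p + max 0 (-(a + pvG sv)) := by
  induction sv generalizing a p with
  | nil => simp [pvG]; omega
  | cons s rest ih =>
    have hG := pvG_nonpos rest
    have hrest : ∀ t ∈ rest, t = "C" ∨ t = "R" ∨ t = "U" ∨ t = "L" :=
      fun t ht => hpre t (List.mem_cons_of_mem _ ht)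
    have hs := hpre s (List.mem_cons_self ..)
    rcases hs with h | h | h | h <;> subst h <;>
      simp only [List.foldl_cons, pvStepA, pvG_cons, pvLookA_C, pvLookA_R, pvLookA_U, pvLookA_L,
        pvLookB_C, pvLookB_R, pvLookB_U, pvLookB_L, if_true]
    · -- "C": demand
      by_cases hav : a > (0 : Int)
      · rw [if_pos hav, ih (a - 1) p (by omega) hrest]; omega
      · rw [if_neg hav, ih a (p + 1) ha hrest]; omega
    · -- "R": supply
      rw [if_neg (show ¬((-1:Int) = 1) by decide), ih (a + 1) p (by omega) hrest]; omega
    · -- "U": demand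
      by_cases hav : a > (0 : Int)
      · rw [if_pos hav, ih (a - 1) p (by omega) hrest]; omega
      · rw [if_neg hav, ih a (p + 1) ha hrest]; omega
    · -- "L": supply
      rw [if_neg (show ¬((-1:Int) = 1) by decide), ih (a + 1) p (by omega) hrest]; omega

-- ===== VERDICT (by name: the statement is the Claim_ definition above) =====
theorem minimum_number_chair_purchase_spec : Claim_equal_minimum_number_chair_purchase := by
  intro sv _ hpre
  unfold Spec_minimum_number_chair_purchase minimum_number_chair_purchase minimum_number_chair_purchase_alt
  rw [pvInv sv 0 0 le_rfl hpre, List.foldl_reverse]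
  have : (sv.foldr (fun sim g => min 0 ((pvDictB.get? sim).getD 0 + g)) 0) = pvG sv := rfl
  simp only [this]
  have := pvG_nonpos sv
  omega
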